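-- pv_equiv track=rewrite | github.com/SeraphKAA/third-year | algoritms and anything/laba 4/test.py | get_selected_items_list
-- ===== SOURCE A (Python) =====
-- def get_selected_items_list(stuffdict, A = 2000):
--       V, area, value = get_memtable(stuffdict)
--       n = len(value)
--       res = V[n][A]      # начинаем с последнего элемента таблицы
--       a = A              # начальная площадь - максимальная
--       items_list = []    # список площадей и ценностей
--
--       for i in range(n, 0, -1):  # идём в обратном порядке
--             if res <= 0:  # условие прерывания - собрали "рюкзак"
--                   break
--             if res == V[i-1][a]:  # ничего не делаем, двигаемся дальше
--                   continue
--             else: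
--                   # "забираем" предмет
--                   items_list.append((area[i-1], value[i-1]))
--                   res -= value[i-1]   # отнимаем значение ценности от общей
--                   a -= area[i-1]  # отнимаем площадь от общей
--
--       selected_stuff = []
--
--       # находим ключи исходного словаря - названия предметов
--       for search in items_list:
--             for key, value in stuffdict.items():
--                   if value == search:
--                         selected_stuff.append(key)
--
--       return selected_stuff
--
-- def get_memtable(stuffdict, A = 2000):
--       area, value = get_area_and_value(stuffdict)
--       n = len(value) # находим размеры таблицы
--
--       # создаём таблицу из нулевых значений
--       V = [[0 for a in range(A+1)] for i in range(n+1)]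
--
--       for i in range(n+1):
--             for a in range(A+1):
--                   # базовый случай
--                   if i == 0 or a == 0:
--                         V[i][a] = 0
--
--                   # если площадь предмета меньше площади столбца,
--                   # максимизируем значение суммарной ценности
--                   elif area[i-1] <= a:
--                         V[i][a] = max(value[i-1] + V[i-1][a-area[i-1]], V[i-1][a])
--
--                   # если площадь предмета больше площади столбца,
--                   # забираем значение ячейки из предыдущей строки
--                   else:
--                         V[i][a] = V[i-1][a]
--       return V, area, value
--
-- def get_area_and_value(stuffdict):
--     area = [stuffdict[item][0] for item in stuffdict]
--     value = [stuffdict[item][1] for item in stuffdict]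
--     return area, value
-- ===== SOURCE B (Python) =====
-- def get_selected_items_list(stuffdict, A=2000):
--     # Sparse top-down evaluation: propagate the set of needed capacities per
--     # level backwards, evaluate only those DP cells forwards, then backtrack.
--     pairs = [stuffdict[k] for k in stuffdict]
--     n = len(pairs)
--     needs = [set() for _ in range(n + 1)]
--     needs[n] = {A}
--     for i in range(n, 0, -1):
--         w = pairs[i - 1][0]
--         needs[i - 1] = set(needs[i]) | {a - w for a in needs[i] if a != 0 and w <= a}
--     rows = [dict() for _ in range(n + 1)]
--     for a in needs[0]:
--         rows[0][a] = 0
--     for i in range(1, n + 1):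
--         w, v = pairs[i - 1]
--         prev = rows[i - 1]
--         cur = rows[i]
--         for a in needs[i]:
--             if a == 0:
--                 cur[a] = 0
--             elif w <= a:
--                 cur[a] = max(v + prev[a - w], prev[a])
--             else:
--                 cur[a] = prev[a]
--     res = rows[n][A]
--     a = A
--     taken = []
--     i = n
--     while i > 0 and res > 0:
--         if res != rows[i - 1][a]:
--             w, v = pairs[i - 1]
--             taken.append((w, v))
--             res -= v
--             a -= w
--         i -= 1
--     by_val = {}
--     for key, val in stuffdict.items():
--         by_val.setdefault(val, []).append(key)
--     out = []
--     for t in taken: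
--         out.extend(by_val.get(t, []))
--     return out
-- ===== Notes on version B (the rewrite author's own statement) =====
-- stated objective: alternative
-- what changed: B replaces the dense bottom-up (n+1)x2001 DP table by a sparse top-down evaluation (a backward pass collecting the set of needed capacities per level, then a forward pass filling per-level dicts on those capacities only) and replaces A's nested scan over the dict per taken item by one hash index grouping keys by their (area,value) pair.
-- intended difference: For -2000 <= A < 0 with some positive-value item of area <= A+2001, A's V[n][A] wraps around (get_memtable ignores the passed A and always builds a 2001-wide table) and A returns the nonempty selection for the accidental capacity A+2001, while B returns [] - the intended result, since nothing fits a negative capacity. — e.g. on get_selected_items_list([("x", (1, 5))], -2000): A returns ["x"], B returns []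
import Mathlib
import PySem

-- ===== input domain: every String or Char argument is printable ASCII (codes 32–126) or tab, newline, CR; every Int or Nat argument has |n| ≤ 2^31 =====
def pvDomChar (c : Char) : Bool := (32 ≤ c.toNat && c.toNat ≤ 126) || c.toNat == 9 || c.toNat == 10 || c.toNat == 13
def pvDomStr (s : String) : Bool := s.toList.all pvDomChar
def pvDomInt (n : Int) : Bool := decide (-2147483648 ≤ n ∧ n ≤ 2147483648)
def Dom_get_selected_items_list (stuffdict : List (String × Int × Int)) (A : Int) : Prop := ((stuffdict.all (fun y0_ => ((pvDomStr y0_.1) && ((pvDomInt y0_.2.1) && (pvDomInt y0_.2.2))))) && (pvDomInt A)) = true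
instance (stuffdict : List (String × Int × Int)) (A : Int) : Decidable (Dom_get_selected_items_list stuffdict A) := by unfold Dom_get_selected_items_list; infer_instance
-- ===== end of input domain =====

set_option maxRecDepth 8000


-- B replaces A's dense (n+1)×2001 bottom-up DP table by a sparse two-pass evaluation (backward
-- needed-capacity sets, forward per-level dicts) plus a hash-grouped key lookup; 'objective: alternative'.
-- A builds its table with get_memtable's DEFAULT capacity 2000 (the caller never passes A on), so the
-- passed A only indexes that table: A > 2000 / A < -2001 raise IndexError (outside Pre_), and
-- -2001 ≤ A < 0 hits Python's negative-index wraparound (the D_ region below).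

-- ===== PORT A =====
-- V[i][a] read/write with Python indexing (total forms; in-range under Pre_)
def pvGet2 (V : List (List Int)) (i a : Int) : Int :=
  PySem.List.pyGetD (PySem.List.pyGetD V i []) a 0
def pvSet2 (V : List (List Int)) (i a : Int) (x : Int) : List (List Int) :=
  PySem.List.pySetD V i (PySem.List.pySetD (PySem.List.pyGetD V i []) a x)

-- get_area_and_value is inlined: area = stuffdict.map (·.2.1), value = stuffdict.map (·.2.2)

-- one row i of the table-filling double loop (the inner 'for a in range(A+1)')
def pvTblStep (area value : List Int) (V : List (List Int)) (i : Int) : List (List Int) :=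
  (PySem.List.pyRange 0 2001 1).foldl (fun V a =>
    if i = 0 ∨ a = 0 then pvSet2 V i a 0
    else if PySem.List.pyGetD area (i-1) 0 ≤ a then
      pvSet2 V i a (max (PySem.List.pyGetD value (i-1) 0 + pvGet2 V (i-1) (a - PySem.List.pyGetD area (i-1) 0)) (pvGet2 V (i-1) a))
    else pvSet2 V i a (pvGet2 V (i-1) a)) V

-- get_memtable(stuffdict) — always called with its DEFAULT A = 2000, hence the constant 2001 width
def get_memtable (stuffdict : List (String × Int × Int)) : List (List Int) × List Int × List Int :=
  ((PySem.List.pyRange 0 ((stuffdict.map (fun p => p.2.2)).length + 1) 1).foldl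
      (pvTblStep (stuffdict.map (fun p => p.2.1)) (stuffdict.map (fun p => p.2.2)))
      ((PySem.List.pyRange 0 ((stuffdict.map (fun p => p.2.2)).length + 1) 1).map
        (fun _ => (PySem.List.pyRange 0 2001 1).map (fun _ => (0:Int)))),
   stuffdict.map (fun p => p.2.1), stuffdict.map (fun p => p.2.2))

-- the 'for i in range(n, 0, -1)' backtracking loop; 'break' = keep the state once res ≤ 0
def pvABacktrack (mt : List (List Int) × List Int × List Int) (A : Int) : List (Int × Int) :=
  ((PySem.List.pyRange (mt.2.2.length : Int) 0 (-1)).foldl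
    (fun (s : Int × Int × List (Int × Int)) i =>
      if s.1 ≤ 0 then s
      else if s.1 = pvGet2 mt.1 (i-1) s.2.1 then s
      else (s.1 - PySem.List.pyGetD mt.2.2 (i-1) 0,
            s.2.1 - PySem.List.pyGetD mt.2.1 (i-1) 0,
            s.2.2 ++ [(PySem.List.pyGetD mt.2.1 (i-1) 0, PySem.List.pyGetD mt.2.2 (i-1) 0)]))
    (pvGet2 mt.1 (mt.2.2.length : Int) A, A, [])).2.2

-- 'for search in items_list: for key, value in stuffdict.items(): if value == search: append(key)'
def pvAFinal (stuffdict : List (String × Int × Int)) (items_list : List (Int × Int)) : List String :=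
  items_list.foldl (fun acc search =>
    stuffdict.foldl (fun acc kv => if kv.2 = search then acc ++ [kv.1] else acc) acc) []

def get_selected_items_list (stuffdict : List (String × Int × Int)) (A : Int) : List String :=
  pvAFinal stuffdict (pvABacktrack (get_memtable stuffdict) A)

-- ===== PORT B =====
-- backward pass: needs[i-1] = set(needs[i]) | {a - w for a in needs[i] if a != 0 and w <= a}
def pvAltNeedsStep (pairs : List (Int × Int)) (needs : List (PySem.Set Int)) (i : Int) : List (PySem.Set Int) :=
  PySem.List.pySetD needs (i-1)
    (PySem.Set.union (PySem.Set.ofList (PySem.List.pyGetD needs i []))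
      (PySem.Set.ofList
        (((PySem.List.pyGetD needs i []).filter
            (fun a => decide (a ≠ 0) && decide ((PySem.List.pyGetD pairs (i-1) (0,0)).1 ≤ a))).map
          (fun a => a - (PySem.List.pyGetD pairs (i-1) (0,0)).1))))

def pvAltNeeds (pairs : List (Int × Int)) (A : Int) : List (PySem.Set Int) :=
  (PySem.List.pyRange (pairs.length : Int) 0 (-1)).foldl (pvAltNeedsStep pairs)
    (PySem.List.pySetD ((PySem.List.pyRange 0 ((pairs.length : Int) + 1) 1).map (fun _ => (PySem.Set.empty : PySem.Set Int)))
      (pairs.length : Int) (PySem.Set.ofList [A]))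

-- forward pass: evaluate the recurrence only on the needed capacities of each level
def pvAltRowsStep (pairs : List (Int × Int)) (needs : List (PySem.Set Int))
    (rows : List (PySem.Dict Int Int)) (i : Int) : List (PySem.Dict Int Int) :=
  PySem.List.pySetD rows i
    (((PySem.List.pyGetD needs i [] : List Int)).foldl (fun d a =>
        if a = 0 then d.insert a 0
        else if (PySem.List.pyGetD pairs (i-1) (0,0)).1 ≤ a then
          d.insert a (max ((PySem.List.pyGetD pairs (i-1) (0,0)).2 +
                (PySem.List.pyGetD rows (i-1) PySem.Dict.empty).getD (a - (PySem.List.pyGetD pairs (i-1) (0,0)).1) 0)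
              ((PySem.List.pyGetD rows (i-1) PySem.Dict.empty).getD a 0))
        else d.insert a ((PySem.List.pyGetD rows (i-1) PySem.Dict.empty).getD a 0))
      (PySem.List.pyGetD rows i PySem.Dict.empty))

def pvAltRows (pairs : List (Int × Int)) (needs : List (PySem.Set Int)) : List (PySem.Dict Int Int) :=
  (PySem.List.pyRange 1 ((pairs.length : Int) + 1) 1).foldl (pvAltRowsStep pairs needs)
    (PySem.List.pySetD ((PySem.List.pyRange 0 ((pairs.length : Int) + 1) 1).map (fun _ => (PySem.Dict.empty : PySem.Dict Int Int)))
      0 ((PySem.List.pyGetD needs 0 [] : List Int).foldl (fun d a => d.insert a 0) PySem.Dict.empty))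

-- 'while i > 0 and res > 0: ...'
def pvAltLoop (pairs : List (Int × Int)) (rows : List (PySem.Dict Int Int)) :
    Nat → Int → Int → List (Int × Int) → List (Int × Int)
  | 0, _, _, tk => tk
  | i+1, res, a, tk =>
    if res ≤ 0 then tk
    else if res = (PySem.List.pyGetD rows (i : Int) PySem.Dict.empty).getD a 0 then
      pvAltLoop pairs rows i res a tk
    else
      pvAltLoop pairs rows i (res - (PySem.List.pyGetD pairs (i : Int) (0,0)).2)
        (a - (PySem.List.pyGetD pairs (i : Int) (0,0)).1)
        (tk ++ [PySem.List.pyGetD pairs (i : Int) (0,0)])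

def pvAltTaken (stuffdict : List (String × Int × Int)) (A : Int) : List (Int × Int) :=
  pvAltLoop (stuffdict.map (fun p => p.2))
    (pvAltRows (stuffdict.map (fun p => p.2)) (pvAltNeeds (stuffdict.map (fun p => p.2)) A))
    (stuffdict.map (fun p => p.2)).length
    ((PySem.List.pyGetD (pvAltRows (stuffdict.map (fun p => p.2)) (pvAltNeeds (stuffdict.map (fun p => p.2)) A))
        ((stuffdict.map (fun p => p.2)).length : Int) PySem.Dict.empty).getD A 0)
    A []

-- group the keys by their (area, value) pair once, then one lookup per taken pair
def pvAltFinal (stuffdict : List (String × Int × Int)) (tk : List (Int × Int)) : List String :=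
  tk.foldl (fun acc t => acc ++
      (stuffdict.foldl (fun d kv => d.modify kv.2 [] (fun l => l ++ [kv.1]))
        (PySem.Dict.empty : PySem.Dict (Int × Int) (List String))).getD t []) []

def get_selected_items_list_alt (stuffdict : List (String × Int × Int)) (A : Int) : List String :=
  pvAltFinal stuffdict (pvAltTaken stuffdict A)

-- ===== PRECONDITION & SPEC =====
-- Pre_ = exactly the inputs where the Python A returns: A > 2000 or A < -2001 raise IndexError on
-- V[n][A], and a negative area with a nonempty dict raises IndexError while the 2001-wide table is built.
def Pre_get_selected_items_list (stuffdict : List (String × Int × Int)) (A : Int) : Prop :=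
  -2001 ≤ A ∧ A ≤ 2000 ∧ ∀ p ∈ stuffdict, 0 ≤ p.2.1
instance (stuffdict : List (String × Int × Int)) (A : Int) : Decidable (Pre_get_selected_items_list stuffdict A) := by unfold Pre_get_selected_items_list; infer_instance

def pvWitness_get_selected_items_list : (List (String × Int × Int)) × Int := ([("a", (2, 3)), ("b", (1, 4))], 10)

-- On -2000 ≤ A < 0 with a positive-value item of area ≤ A + 2001, A's negative index wraps around and it
-- returns the (nonempty) selection for the accidental capacity A + 2001, while B returns [] — the intended
-- result, since nothing fits a negative capacity.
def D_get_selected_items_list (stuffdict : List (String × Int × Int)) (A : Int) : Prop :=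
  A < 0 ∧ -2000 ≤ A ∧ ∃ p ∈ stuffdict, 0 < p.2.2 ∧ p.2.1 ≤ A + 2001
instance (stuffdict : List (String × Int × Int)) (A : Int) : Decidable (D_get_selected_items_list stuffdict A) := by unfold D_get_selected_items_list; infer_instance

def Spec_get_selected_items_list (stuffdict : List (String × Int × Int)) (A : Int) (out : List String) : Prop := ¬ D_get_selected_items_list stuffdict A → out = get_selected_items_list_alt stuffdict A
instance (stuffdict : List (String × Int × Int)) (A : Int) (out : List String) : Decidable (Spec_get_selected_items_list stuffdict A out) := by unfold Spec_get_selected_items_list; infer_instance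

def pvDiffWitness_get_selected_items_list : (List (String × Int × Int)) × Int := ([("x", (1, 5))], -2000)
def pvDiffWitnessOut_get_selected_items_list : (List String) × (List String) := (["x"], [])

-- ===== CLAIM (what is proved, stated in full; the proofs are below) =====
def Claim_unchanged_get_selected_items_list : Prop := ∀ (stuffdict : List (String × Int × Int)) (A : Int), Dom_get_selected_items_list stuffdict A → Pre_get_selected_items_list stuffdict A → Spec_get_selected_items_list stuffdict A (get_selected_items_list stuffdict A)
def Claim_changed_get_selected_items_list : Prop := Dom_get_selected_items_list (pvDiffWitness_get_selected_items_list.1) (pvDiffWitness_get_selected_items_list.2) ∧ Pre_get_selected_items_list (pvDiffWitness_get_selected_items_list.1) (pvDiffWitness_get_selected_items_list.2) ∧ D_get_selected_items_list (pvDiffWitness_get_selected_items_list.1) (pvDiffWitness_get_selected_items_list.2) ∧ get_selected_items_list (pvDiffWitness_get_selected_items_list.1) (pvDiffWitness_get_selected_items_list.2) = pvDiffWitnessOut_get_selected_items_list.1 ∧ get_selected_items_list_alt (pvDiffWitness_get_selected_items_list.1) (pvDiffWitness_get_selected_items_list.2) = pvDiffWitnessOut_get_selected_items_list.2 ∧ pvDiffWitnessOut_get_selected_items_list.1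 ≠ pvDiffWitnessOut_get_selected_items_list.2
def Claim_exact_get_selected_items_list : Prop := ∀ (stuffdict : List (String × Int × Int)) (A : Int), Dom_get_selected_items_list stuffdict A → Pre_get_selected_items_list stuffdict A → D_get_selected_items_list stuffdict A → get_selected_items_list stuffdict A ≠ get_selected_items_list_alt stuffdict A

-- ===== LEMMAS AND PROOFS =====

-- the common recurrence both programs compute: V[i][a] of the dense table / B's sparse cells
def pvDp (pairs : List (Int × Int)) : Nat → Int → Int
  | 0, _ => 0
  | i+1, a =>
    if a = 0 then 0
    else if (PySem.List.pyGetD pairs (i : Int) (0,0)).1 ≤ a then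
      max ((PySem.List.pyGetD pairs (i : Int) (0,0)).2 + pvDp pairs i (a - (PySem.List.pyGetD pairs (i : Int) (0,0)).1))
        (pvDp pairs i a)
    else pvDp pairs i a

def pvRow (pairs : List (Int × Int)) (i : Nat) : List Int :=
  (PySem.List.pyRange 0 2001 1).map (fun a => pvDp pairs i a)

def pvVmap (pairs : List (Int × Int)) : List (List Int) :=
  (PySem.List.pyRange 0 ((pairs.length : Int) + 1) 1).map (fun i => pvRow pairs i.toNat)

-- B's needed-capacity sets, top level t = distance below n: pvNeedsT t = needs[n - t]
def pvNeedsT (pairs : List (Int × Int)) (A : Int) : Nat → PySem.Set Int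
  | 0 => PySem.Set.ofList [A]
  | t+1 =>
    PySem.Set.union (PySem.Set.ofList (pvNeedsT pairs A t))
      (PySem.Set.ofList
        (((pvNeedsT pairs A t).filter
            (fun a => decide (a ≠ 0) && decide ((PySem.List.pyGetD pairs ((pairs.length - 1 - t : Nat) : Int) (0,0)).1 ≤ a))).map
          (fun a => a - (PySem.List.pyGetD pairs ((pairs.length - 1 - t : Nat) : Int) (0,0)).1)))

-- ---- generic utilities ----

theorem pv_set_map_range {α : Type} (n b : Nat) (f : Nat → α) (v : α) :
    ((List.range n).map f).set b v
      = (List.range n).map (fun a => if a = b then v else f a) := by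
  apply List.ext_getElem
  · simp
  · intro i h1 h2
    simp only [List.getElem_set, List.getElem_map, List.getElem_range]
    by_cases hib : i = b
    · simp [hib]
    · rw [if_neg (fun h => hib h.symm), if_neg hib]

theorem pv_getD_map_range {α : Type} (n k : Nat) (f : Nat → α) (d : α) (hk : k < n) :
    ((List.range n).map f).getD k d = f k := by
  rw [List.getD_eq_getElem?_getD]
  simp [List.getElem?_map, List.getElem?_range, hk]

theorem pv_pyGetD_natCast_set_ne {α : Type} (xs : List α) (j k : Nat) (v : α) (d : α)
    (hjk : j ≠ k) : PySem.List.pyGetD (xs.set k v) (j : Int) d = PySem.List.pyGetD xs (j : Int) d := by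
  rw [PySem.List.pyGetD_natCast, PySem.List.pyGetD_natCast]
  rw [List.getD_eq_getElem?_getD, List.getD_eq_getElem?_getD, List.getElem?_set_ne (by omega)]

theorem pv_foldl_insert_getD_of_not_mem (l : List Int) (g : Int → Int) (d0 : PySem.Dict Int Int)
    (a : Int) (ha : a ∉ l) :
    (l.foldl (fun d x => d.insert x (g x)) d0).getD a 0 = d0.getD a 0 := by
  induction l generalizing d0 with
  | nil => rfl
  | cons x t ih =>
    simp only [List.foldl_cons]
    rw [ih _ (by simp_all), PySem.Dict.getD_insert, if_neg (by simp_all)]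

theorem pv_foldl_insert_getD_of_mem (l : List Int) (g : Int → Int) (d0 : PySem.Dict Int Int)
    (a : Int) (hnd : l.Nodup) (ha : a ∈ l) :
    (l.foldl (fun d x => d.insert x (g x)) d0).getD a 0 = g a := by
  induction l generalizing d0 with
  | nil => cases ha
  | cons x t ih =>
    simp only [List.foldl_cons]
    rcases List.mem_cons.mp ha with h | h
    · subst h
      rw [pv_foldl_insert_getD_of_not_mem _ _ _ _ (List.nodup_cons.mp hnd).1]
      rw [PySem.Dict.getD_insert, if_pos rfl]
    · exact ih _ (List.nodup_cons.mp hnd).2 h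

-- ---- facts about the recurrence pvDp ----

theorem pv_dp_zero (pairs : List (Int × Int)) (i : Nat) : pvDp pairs i 0 = 0 := by
  cases i <;> simp [pvDp]

theorem pv_pairs_get_oob (pairs : List (Int × Int)) (i : Int) (h : (pairs.length : Int) ≤ i) :
    PySem.List.pyGetD pairs i (0,0) = (0,0) := by
  have h0 : (0:Int) ≤ i := le_trans (by positivity) h
  simp only [PySem.List.pyGetD, PySem.List.pyGet?, PySem.List.pyIdx?, if_pos h0]
  rw [if_neg (by omega)]
  rfl

theorem pv_pairs_fst_nonneg (pairs : List (Int × Int)) (hw : ∀ p ∈ pairs, 0 ≤ p.1) (i : Int)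
    (hi : 0 ≤ i) : 0 ≤ (PySem.List.pyGetD pairs i (0,0)).1 := by
  by_cases h : (pairs.length : Int) ≤ i
  · rw [pv_pairs_get_oob pairs i h]
  · push_neg at h
    rw [PySem.List.pyGetD_of_nonneg pairs (0,0) hi]
    rw [List.getD_eq_getElem?_getD, List.getElem?_eq_getElem (by omega)]
    exact hw _ (List.getElem_mem _)

theorem pv_dp_nonneg (pairs : List (Int × Int)) (i : Nat) (a : Int) : 0 ≤ pvDp pairs i a := by
  induction i generalizing a with
  | zero => simp [pvDp]
  | succ i ih =>
    simp only [pvDp]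
    split_ifs with h1 h2
    · exact le_refl 0
    · exact le_trans (ih a) (le_max_right _ _)
    · exact ih a

theorem pv_dp_neg (pairs : List (Int × Int)) (hw : ∀ p ∈ pairs, 0 ≤ p.1) (i : Nat) (a : Int)
    (ha : a < 0) : pvDp pairs i a = 0 := by
  induction i with
  | zero => rfl
  | succ i ih =>
    simp only [pvDp]
    have hwnn := pv_pairs_fst_nonneg pairs hw (i : Int) (by positivity)
    rw [if_neg (by omega), if_neg (by omega)]
    exact ih

theorem pv_dp_le_succ (pairs : List (Int × Int)) (i : Nat) (a : Int) :
    pvDp pairs i a ≤ pvDp pairs (i+1) a := by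
  simp only [pvDp]
  split_ifs with h1 h2
  · rw [h1, pv_dp_zero]
  · exact le_max_right _ _
  · exact le_refl _

theorem pv_dp_mono (pairs : List (Int × Int)) (j i : Nat) (h : j ≤ i) (a : Int) :
    pvDp pairs j a ≤ pvDp pairs i a := by
  induction i with
  | zero =>
    have : j = 0 := by omega
    subst this; exact le_refl _
  | succ i ih =>
    rcases Nat.lt_or_ge j (i+1) with hlt | hge
    · exact le_trans (ih (by omega)) (pv_dp_le_succ pairs i a)
    · have : j = i + 1 := by omega
      subst this; exact le_refl _

theorem pv_dp_succ_ne (pairs : List (Int × Int)) (i : Nat) (a : Int)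
    (h : pvDp pairs (i+1) a ≠ pvDp pairs i a) :
    a ≠ 0 ∧ (PySem.List.pyGetD pairs (i : Int) (0,0)).1 ≤ a ∧
      pvDp pairs (i+1) a
        = (PySem.List.pyGetD pairs (i : Int) (0,0)).2 +
            pvDp pairs i (a - (PySem.List.pyGetD pairs (i : Int) (0,0)).1) := by
  by_cases h1 : a = 0
  · exfalso; apply h; rw [h1, pv_dp_zero, pv_dp_zero]
  by_cases h2 : (PySem.List.pyGetD pairs (i : Int) (0,0)).1 ≤ a
  · refine ⟨h1, h2, ?_⟩
    have hd : pvDp pairs (i+1) a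
        = max ((PySem.List.pyGetD pairs (i : Int) (0,0)).2 +
            pvDp pairs i (a - (PySem.List.pyGetD pairs (i : Int) (0,0)).1)) (pvDp pairs i a) := by
      simp only [pvDp]; rw [if_neg h1, if_pos h2]
    rw [hd] at h ⊢
    rcases max_choice ((PySem.List.pyGetD pairs (i : Int) (0,0)).2 +
        pvDp pairs i (a - (PySem.List.pyGetD pairs (i : Int) (0,0)).1)) (pvDp pairs i a) with hc | hc
    · exact hc
    · exact absurd hc h
  · exfalso; apply h
    simp only [pvDp]; rw [if_neg h1, if_neg h2]

-- ---- the table characterization ----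

def pvZRow : List Int := (List.range 2001).map (fun _ => (0:Int))
def pvRowR (pairs : List (Int × Int)) (i : Nat) : List Int :=
  (List.range 2001).map (fun a : Nat => pvDp pairs i (a:Int))
def pvPRow (pairs : List (Int × Int)) (k b : Nat) : List Int :=
  (List.range 2001).map (fun a : Nat => if a < b then pvDp pairs k (a:Int) else 0)
def pvPtbl (pairs : List (Int × Int)) (k : Nat) : List (List Int) :=
  (List.range (pairs.length+1)).map (fun i => if i < k then pvRowR pairs i else pvZRow)

theorem pv_pyRange_nat (b : Nat) :
    PySem.List.pyRange 0 (b : Int) 1 = (List.range b).map (fun k : Nat => (k : Int)) := by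
  rw [PySem.List.pyRange_one]
  rw [show ((b:Int) - 0).toNat = b by omega]
  exact List.map_congr_left (fun a _ => by omega)

theorem pv_row_eq_R (pairs : List (Int × Int)) (i : Nat) : pvRow pairs i = pvRowR pairs i := by
  unfold pvRow pvRowR
  rw [show ((2001:Int)) = ((2001:Nat):Int) by norm_num, pv_pyRange_nat, List.map_map]
  rfl

theorem pv_vmap_eq (pairs : List (Int × Int)) :
    pvVmap pairs = pvPtbl pairs (pairs.length + 1) := by
  unfold pvVmap pvPtbl
  rw [show ((pairs.length : Int) + 1) = ((pairs.length + 1 : Nat) : Int) by push_cast; ring,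
      pv_pyRange_nat, List.map_map]
  apply List.map_congr_left
  intro i hi
  rw [List.mem_range] at hi
  simp only [Function.comp_apply, Int.toNat_natCast, if_pos hi, pv_row_eq_R]

theorem pv_row_get (pairs : List (Int × Int)) (i : Nat) (y : Int) (h0 : 0 ≤ y) (h1 : y ≤ 2000) :
    PySem.List.pyGetD (pvRowR pairs i) y 0 = pvDp pairs i y := by
  rw [PySem.List.pyGetD_of_nonneg _ _ h0]
  unfold pvRowR
  rw [pv_getD_map_range 2001 y.toNat _ _ (by omega)]
  congr 1
  omega

theorem pv_row_get_neg (pairs : List (Int × Int)) (i : Nat) (y : Int)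
    (h0 : -2001 ≤ y) (h1 : y < 0) :
    PySem.List.pyGetD (pvRowR pairs i) y 0 = pvDp pairs i (2001 + y) := by
  have hlen : (pvRowR pairs i).length = 2001 := by simp [pvRowR]
  simp only [PySem.List.pyGetD, PySem.List.pyGet?, PySem.List.pyIdx?, hlen]
  rw [if_neg (by omega), if_pos (by omega)]
  have hk : 2001 - (-y).toNat < 2001 := by omega
  simp only [Option.bind_some, pvRowR]
  rw [List.getElem?_map, List.getElem?_range hk]
  simp only [Option.map_some, Option.getD_some]
  congr 1
  omega

theorem pv_area_get (s : List (String × Int × Int)) (j : Int) :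
    PySem.List.pyGetD (s.map (fun p => p.2.1)) j 0
      = (PySem.List.pyGetD (s.map (fun p => p.2)) j (0,0)).1 := by
  have h1 := PySem.List.pyGetD_map (fun p : String × Int × Int => p.2.1) s j ("", (0,0))
  have h2 := PySem.List.pyGetD_map (fun p : String × Int × Int => p.2) s j ("", (0,0))
  simp at h1 h2
  rw [h1, h2]

theorem pv_value_get (s : List (String × Int × Int)) (j : Int) :
    PySem.List.pyGetD (s.map (fun p => p.2.2)) j 0
      = (PySem.List.pyGetD (s.map (fun p => p.2)) j (0,0)).2 := by
  have h1 := PySem.List.pyGetD_map (fun p : String × Int × Int => p.2.2) s j ("", (0,0))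
  have h2 := PySem.List.pyGetD_map (fun p : String × Int × Int => p.2) s j ("", (0,0))
  simp at h1 h2
  rw [h1, h2]

theorem pv_tblstep (s : List (String × Int × Int))
    (hw : ∀ p ∈ s.map (fun p => p.2), 0 ≤ p.1) (k : Nat) (hk : k ≤ s.length) :
    pvTblStep (s.map (fun p => p.2.1)) (s.map (fun p => p.2.2))
        (pvPtbl (s.map (fun p => p.2)) k) (k : Int)
      = pvPtbl (s.map (fun p => p.2)) (k+1) := by
  set pairs := s.map (fun p => p.2) with hpairs
  have hm : pairs.length = s.length := by simp [hpairs]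
  have hlen : (pvPtbl pairs k).length = s.length + 1 := by simp [pvPtbl, hm]
  -- the invariant of the inner loop over a
  have main : ∀ b : Nat, b ≤ 2001 →
      (PySem.List.pyRange 0 (b : Int) 1).foldl (fun V a =>
        if (k:Int) = 0 ∨ a = 0 then pvSet2 V (k:Int) a 0
        else if PySem.List.pyGetD (s.map (fun p => p.2.1)) ((k:Int)-1) 0 ≤ a then
          pvSet2 V (k:Int) a (max (PySem.List.pyGetD (s.map (fun p => p.2.2)) ((k:Int)-1) 0 +
              pvGet2 V ((k:Int)-1) (a - PySem.List.pyGetD (s.map (fun p => p.2.1)) ((k:Int)-1) 0))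
            (pvGet2 V ((k:Int)-1) a))
        else pvSet2 V (k:Int) a (pvGet2 V ((k:Int)-1) a)) (pvPtbl pairs k)
      = (pvPtbl pairs k).set k (pvPRow pairs k b) := by
    intro b
    induction b with
    | zero =>
      intro _
      rw [PySem.List.pyRange_one_eq_nil (by norm_num)]
      simp only [List.foldl_nil]
      unfold pvPtbl
      rw [pv_set_map_range]
      apply List.map_congr_left
      intro i hi
      rw [List.mem_range] at hi
      by_cases hik : i = k
      · subst hik
        rw [if_pos rfl, if_neg (by omega)]
        unfold pvPRow pvZRow
        apply List.map_congr_left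
        intro a _
        rw [if_neg (by omega)]
      · rw [if_neg hik]
    | succ b ih =>
      intro hb
      rw [show (((b+1:Nat)):Int) = (b:Int) + 1 by push_cast; ring,
          PySem.List.pyRange_one_succ_right (by positivity), List.foldl_append,
          ih (by omega)]
      set st := (pvPtbl pairs k).set k (pvPRow pairs k b) with hst
      simp only [List.foldl_cons, List.foldl_nil]
      -- access facts
      have hstlen : st.length = s.length + 1 := by simp [hst, hlen]
      have F1 : PySem.List.pyGetD st (k:Int) [] = pvPRow pairs k b := by
        rw [PySem.List.pyGetD_natCast, hst, List.getD_eq_getElem?_getD,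
            List.getElem?_set_self (by omega)]
        rfl
      have hset : ∀ x : Int, pvSet2 st (k:Int) (b:Int) x
          = (pvPtbl pairs k).set k ((pvPRow pairs k b).set b x) := by
        intro x
        unfold pvSet2
        rw [F1, PySem.List.pySetD_of_nonneg _ _ (by positivity),
            PySem.List.pySetD_of_nonneg _ _ (by positivity)]
        simp only [Int.toNat_natCast, hst, List.set_set]
      have hrow : ∀ x : Int, x = pvDp pairs k (b:Int) →
          (pvPtbl pairs k).set k ((pvPRow pairs k b).set b x)
            = (pvPtbl pairs k).set k (pvPRow pairs k (b+1)) := by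
        intro x hx
        congr 1
        unfold pvPRow
        rw [pv_set_map_range]
        apply List.map_congr_left
        intro a ha
        rw [List.mem_range] at ha
        by_cases hab : a = b
        · subst hab; rw [if_pos rfl, if_pos (by omega), hx]
        · rw [if_neg hab]
          by_cases h2 : a < b
          · rw [if_pos h2, if_pos (by omega)]
          · rw [if_neg h2, if_neg (by omega)]
      by_cases hk0 : k = 0 ∨ b = 0
      · rw [if_pos (by rcases hk0 with h | h <;> subst h <;> simp), hset, hrow 0 ?_]
        rcases hk0 with h | h
        · subst h; rfl
        · subst h; rw [show ((0:Nat):Int) = 0 by rfl, pv_dp_zero]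
      · push_neg at hk0
        obtain ⟨hk1, hb1⟩ := hk0
        have hki : ¬((k:Int) = 0 ∨ (b:Int) = 0) := by push_neg; constructor <;> omega
        rw [if_neg hki]
        have hidx : (k:Int) - 1 = ((k-1 : Nat) : Int) := by omega
        have F2 : PySem.List.pyGetD st ((k:Int)-1) [] = pvRowR pairs (k-1) := by
          rw [hidx, hst, pv_pyGetD_natCast_set_ne _ _ _ _ _ (by omega),
              PySem.List.pyGetD_natCast]
          unfold pvPtbl
          rw [pv_getD_map_range _ _ _ _ (by omega), if_pos (by omega)]
        have hwv : PySem.List.pyGetD (s.map (fun p => p.2.1)) ((k:Int)-1) 0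
            = (PySem.List.pyGetD pairs ((k:Int)-1) (0,0)).1 := pv_area_get s _
        have hvv : PySem.List.pyGetD (s.map (fun p => p.2.2)) ((k:Int)-1) 0
            = (PySem.List.pyGetD pairs ((k:Int)-1) (0,0)).2 := pv_value_get s _
        set w := (PySem.List.pyGetD pairs ((k:Int)-1) (0,0)).1 with hwdef
        set v := (PySem.List.pyGetD pairs ((k:Int)-1) (0,0)).2 with hvdef
        have hwnn : 0 ≤ w := pv_pairs_fst_nonneg pairs hw _ (by omega)
        have hdp : pvDp pairs k (b:Int)
            = if w ≤ (b:Int) then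
                max (v + pvDp pairs (k-1) ((b:Int) - w)) (pvDp pairs (k-1) (b:Int))
              else pvDp pairs (k-1) (b:Int) := by
          have hks : k = (k-1) + 1 := by omega
          rw [hks]
          show pvDp pairs ((k-1)+1) (b:Int) = _
          simp only [pvDp]
          rw [if_neg (by omega), ← hidx, ← hwdef, ← hvdef, Nat.add_sub_cancel]
        by_cases hg : w ≤ (b:Int)
        · rw [hwv, if_pos hg, hset, hrow _ ?_]
          rw [hvv]
          unfold pvGet2
          rw [F2, pv_row_get _ _ _ (by omega) (by omega),
              pv_row_get _ _ _ (by omega) (by omega), hdp, if_pos hg]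
        · rw [hwv, if_neg hg, hset, hrow _ ?_]
          unfold pvGet2
          rw [F2, pv_row_get _ _ _ (by omega) (by omega), hdp, if_neg hg]
  have step_eq : pvTblStep (s.map (fun p => p.2.1)) (s.map (fun p => p.2.2))
      (pvPtbl pairs k) (k : Int) = (pvPtbl pairs k).set k (pvPRow pairs k 2001) := by
    unfold pvTblStep
    exact main 2001 (le_refl _)
  rw [step_eq]
  unfold pvPtbl
  rw [pv_set_map_range]
  apply List.map_congr_left
  intro i hi
  rw [List.mem_range] at hi
  by_cases hik : i = k
  · subst hik
    rw [if_pos rfl, if_pos (by omega)]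
    unfold pvPRow pvRowR
    apply List.map_congr_left
    intro a ha
    rw [List.mem_range] at ha
    rw [if_pos (by omega)]
  · rw [if_neg hik]
    by_cases h2 : i < k
    · rw [if_pos h2, if_pos (by omega)]
    · rw [if_neg h2, if_neg (by omega)]

theorem pv_table_char (stuffdict : List (String × Int × Int))
    (hw : ∀ p ∈ stuffdict.map (fun p => p.2), 0 ≤ p.1) :
    (get_memtable stuffdict).1 = pvVmap (stuffdict.map (fun p => p.2)) := by
  set pairs := stuffdict.map (fun p => p.2) with hpairs
  have hm : (stuffdict.map (fun p => p.2.2)).length = stuffdict.length := by simp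
  have hm2 : pairs.length = stuffdict.length := by simp [hpairs]
  show (PySem.List.pyRange 0 ((stuffdict.map (fun p => p.2.2)).length + 1) 1).foldl
      (pvTblStep (stuffdict.map (fun p => p.2.1)) (stuffdict.map (fun p => p.2.2)))
      ((PySem.List.pyRange 0 ((stuffdict.map (fun p => p.2.2)).length + 1) 1).map
        (fun _ => (PySem.List.pyRange 0 2001 1).map (fun _ => (0:Int))))
    = pvVmap pairs
  have hcast : ((stuffdict.map (fun p => p.2.2)).length : Int) + 1
      = ((stuffdict.length + 1 : Nat) : Int) := by rw [hm]; push_cast; ring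
  rw [hcast, pv_pyRange_nat, List.foldl_map, List.map_map]
  have hV0 : (List.range (stuffdict.length + 1)).map
        ((fun _ => (PySem.List.pyRange 0 2001 1).map (fun _ => (0:Int))) ∘ (fun k : Nat => (k:Int)))
      = pvPtbl pairs 0 := by
    unfold pvPtbl
    rw [hm2]
    apply List.map_congr_left
    intro i _
    simp only [Function.comp_apply, if_neg (Nat.not_lt_zero _)]
    rw [show ((2001:Int)) = ((2001:Nat):Int) by norm_num, pv_pyRange_nat, List.map_map]
    rfl
  rw [hV0]
  have aux : ∀ K, K ≤ stuffdict.length + 1 →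
      (List.range K).foldl (fun V kk =>
        pvTblStep (stuffdict.map (fun p => p.2.1)) (stuffdict.map (fun p => p.2.2)) V ((kk:Nat) : Int))
        (pvPtbl pairs 0) = pvPtbl pairs K := by
    intro K
    induction K with
    | zero => intro _; rfl
    | succ K ih =>
      intro hK
      rw [List.range_succ, List.foldl_append, ih (by omega)]
      simp only [List.foldl_cons, List.foldl_nil]
      exact pv_tblstep stuffdict hw K (by omega)
  have haux := aux (stuffdict.length + 1) (le_refl _)
  rw [pv_vmap_eq, hm2]
  exact haux

-- ---- B's needed-capacity sets ----

def pvNeedsPartial (pairs : List (Int × Int)) (A : Int) (k : Nat) : List (PySem.Set Int) :=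
  (List.range (pairs.length+1)).map
    (fun j => if k ≤ j then pvNeedsT pairs A (pairs.length - j) else PySem.Set.empty)

theorem pv_needs_char (pairs : List (Int × Int)) (A : Int) :
    pvAltNeeds pairs A = pvNeedsPartial pairs A 0 := by
  set m := pairs.length with hm
  have hinit : PySem.List.pySetD
        ((PySem.List.pyRange 0 ((m : Int) + 1) 1).map (fun _ => (PySem.Set.empty : PySem.Set Int)))
        (m : Int) (PySem.Set.ofList [A])
      = pvNeedsPartial pairs A m := by
    rw [show ((m : Int) + 1) = ((m + 1 : Nat) : Int) by push_cast; ring, pv_pyRange_nat,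
        List.map_map, PySem.List.pySetD_of_nonneg _ _ (by positivity)]
    simp only [Int.toNat_natCast]
    unfold pvNeedsPartial
    rw [pv_set_map_range, ← hm]
    apply List.map_congr_left
    intro j hj
    rw [List.mem_range] at hj
    by_cases hjm : j = m
    · subst hjm
      rw [if_pos rfl, if_pos (le_refl _), Nat.sub_self]
      rfl
    · rw [if_neg hjm, if_neg (by omega)]
      rfl
  have aux : ∀ k, k ≤ m →
      (PySem.List.pyRange (k : Int) 0 (-1)).foldl (pvAltNeedsStep pairs) (pvNeedsPartial pairs A k)
        = pvNeedsPartial pairs A 0 := by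
    intro k
    induction k with
    | zero =>
      intro _
      rw [PySem.List.pyRange_neg_one_eq_nil (by norm_num)]
      rfl
    | succ k ih =>
      intro hk
      rw [show (((k+1 : Nat)) : Int) = (k : Int) + 1 by push_cast; ring,
          PySem.List.pyRange_neg_one_cons (by positivity), List.foldl_cons]
      have hstep : pvAltNeedsStep pairs (pvNeedsPartial pairs A (k+1)) ((k:Int)+1)
          = pvNeedsPartial pairs A k := by
        unfold pvAltNeedsStep
        have hg : PySem.List.pyGetD (pvNeedsPartial pairs A (k+1)) ((k:Int)+1) []
            = pvNeedsT pairs A (m - (k+1)) := by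
          rw [show ((k:Int)+1) = (((k+1:Nat)):Int) by push_cast; ring, PySem.List.pyGetD_natCast]
          unfold pvNeedsPartial
          rw [← hm, pv_getD_map_range _ _ _ _ (by omega), if_pos (le_refl _)]
        have hidx : ((k:Int)+1) - 1 = ((k:Nat) : Int) := by ring
        rw [hg, hidx, PySem.List.pySetD_of_nonneg _ _ (by positivity)]
        simp only [Int.toNat_natCast]
        unfold pvNeedsPartial
        rw [pv_set_map_range, ← hm]
        apply List.map_congr_left
        intro j hj
        rw [List.mem_range] at hj
        by_cases hjk : j = k
        · subst hjk
          rw [if_pos rfl, if_pos (le_refl _)]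
          have ht : m - j = (m - (j+1)) + 1 := by omega
          rw [ht]
          show _ = pvNeedsT pairs A ((m - (j+1)) + 1)
          simp only [pvNeedsT]
          rw [← hm]
          have hcast : ((m - 1 - (m - (j+1)) : Nat) : Int) = ((j:Nat) : Int) := by omega
          rw [hcast]
        · rw [if_neg hjk]
          by_cases h2 : k ≤ j
          · rw [if_pos h2, if_pos (by omega)]
          · rw [if_neg h2, if_neg (by omega)]
      rw [hstep, show ((k:Int) + 1 - 1 : Int) = ((k:Nat):Int) by ring, ih (by omega)]
  unfold pvAltNeeds
  rw [← hm, hinit]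
  exact aux m (le_refl _)

theorem pv_needs_mem (pairs : List (Int × Int)) (A : Int) (t : Nat) (i : Nat)
    (hi : i + t = pairs.length) :
    PySem.List.pyGetD (pvAltNeeds pairs A) (i : Int) [] = pvNeedsT pairs A t := by
  rw [pv_needs_char, PySem.List.pyGetD_natCast]
  unfold pvNeedsPartial
  rw [pv_getD_map_range _ _ _ _ (by omega), if_pos (by omega)]
  congr 1
  omega

theorem pv_needs_nodup (pairs : List (Int × Int)) (A : Int) (t : Nat) :
    (pvNeedsT pairs A t).Nodup := by
  cases t with
  | zero => exact PySem.Set.nodup_ofList _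
  | succ t => exact PySem.Set.nodup_union _ _ (PySem.Set.nodup_ofList _)

theorem pv_needs_mono (pairs : List (Int × Int)) (A : Int) (t : Nat) (a : Int)
    (ha : a ∈ pvNeedsT pairs A t) : a ∈ pvNeedsT pairs A (t+1) := by
  show a ∈ PySem.Set.union _ _
  rw [PySem.Set.mem_union]
  exact Or.inl ((PySem.Set.mem_ofList _ _).mpr ha)

theorem pv_needs_shift (pairs : List (Int × Int)) (A : Int) (t : Nat) (a : Int)
    (ha : a ∈ pvNeedsT pairs A t) (h0 : a ≠ 0)
    (hle : (PySem.List.pyGetD pairs ((pairs.length - 1 - t : Nat) : Int) (0,0)).1 ≤ a) :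
    a - (PySem.List.pyGetD pairs ((pairs.length - 1 - t : Nat) : Int) (0,0)).1
      ∈ pvNeedsT pairs A (t+1) := by
  show _ ∈ PySem.Set.union _ _
  rw [PySem.Set.mem_union]
  refine Or.inr ((PySem.Set.mem_ofList _ _).mpr ?_)
  rw [List.mem_map]
  refine ⟨a, ?_, rfl⟩
  rw [List.mem_filter]
  refine ⟨ha, ?_⟩
  rw [Bool.and_eq_true, decide_eq_true_eq, decide_eq_true_eq]
  exact ⟨h0, hle⟩

theorem pv_needs_self (pairs : List (Int × Int)) (A : Int) : A ∈ pvNeedsT pairs A 0 := by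
  show A ∈ PySem.Set.ofList [A]
  rw [PySem.Set.mem_ofList]
  exact List.mem_singleton.mpr rfl

-- ---- B's sparse rows ----

def pvRprop (pairs : List (Int × Int)) (A : Int) (k : Nat) (rows : List (PySem.Dict Int Int)) : Prop :=
  rows.length = pairs.length + 1 ∧
  ∀ i, i ≤ k → ∀ a ∈ pvNeedsT pairs A (pairs.length - i),
    (PySem.List.pyGetD rows (i : Int) PySem.Dict.empty).getD a 0 = pvDp pairs i a

theorem pv_rows_step (pairs : List (Int × Int)) (A : Int) (k : Nat) (hk : k < pairs.length)
    (rows : List (PySem.Dict Int Int)) (hR : pvRprop pairs A k rows) :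
    pvRprop pairs A (k+1) (pvAltRowsStep pairs (pvAltNeeds pairs A) rows (((k+1:Nat)) : Int)) := by
  obtain ⟨hlen, hprop⟩ := hR
  set m := pairs.length with hm
  have hneeds : PySem.List.pyGetD (pvAltNeeds pairs A) (((k+1:Nat)):Int) []
      = pvNeedsT pairs A (m - (k+1)) := pv_needs_mem pairs A _ _ (by omega)
  have hidx : (((k+1:Nat)):Int) - 1 = ((k:Nat):Int) := by push_cast; ring
  unfold pvAltRowsStep
  rw [hneeds, hidx, PySem.List.pySetD_of_nonneg _ _ (by positivity)]
  simp only [Int.toNat_natCast]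
  constructor
  · rw [List.length_set, hlen]
  intro i hi a ha
  set w := (PySem.List.pyGetD pairs ((k:Nat):Int) (0,0)).1 with hwdef
  set v := (PySem.List.pyGetD pairs ((k:Nat):Int) (0,0)).2 with hvdef
  set prev := PySem.List.pyGetD rows ((k:Nat):Int) PySem.Dict.empty with hprev
  by_cases hik : i = k + 1
  · subst hik
    have hgd : PySem.List.pyGetD (rows.set (k+1)
          ((pvNeedsT pairs A (m - (k+1))).foldl (fun d a =>
            if a = 0 then d.insert a 0
            else if w ≤ a then d.insert a (max (v + prev.getD (a - w) 0) (prev.getD a 0))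
            else d.insert a (prev.getD a 0)) (PySem.List.pyGetD rows (((k+1:Nat)):Int) PySem.Dict.empty)))
          (((k+1:Nat)):Int) PySem.Dict.empty
        = (pvNeedsT pairs A (m - (k+1))).foldl (fun d a =>
            if a = 0 then d.insert a 0
            else if w ≤ a then d.insert a (max (v + prev.getD (a - w) 0) (prev.getD a 0))
            else d.insert a (prev.getD a 0)) (PySem.List.pyGetD rows (((k+1:Nat)):Int) PySem.Dict.empty) := by
      rw [PySem.List.pyGetD_natCast, List.getD_eq_getElem?_getD, List.getElem?_set_self (by omega)]
      rfl
    rw [hgd]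
    have hfun : (fun (d : PySem.Dict Int Int) (a : Int) =>
          if a = 0 then d.insert a 0
          else if w ≤ a then d.insert a (max (v + prev.getD (a - w) 0) (prev.getD a 0))
          else d.insert a (prev.getD a 0))
        = (fun (d : PySem.Dict Int Int) (a : Int) => d.insert a
            (if a = 0 then 0
             else if w ≤ a then max (v + prev.getD (a - w) 0) (prev.getD a 0)
             else prev.getD a 0)) := by
      funext d a
      split_ifs <;> rfl
    rw [hfun, pv_foldl_insert_getD_of_mem _ _ _ _ (pv_needs_nodup pairs A _) ha]
    -- the written value is the recurrence value
    have hmono : ∀ b ∈ pvNeedsT pairs A (m - (k+1)), b ∈ pvNeedsT pairs A (m - k) := by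
      intro b hb
      have : m - k = (m - (k+1)) + 1 := by omega
      rw [this]
      exact pv_needs_mono pairs A _ b hb
    have hprevs : ∀ b ∈ pvNeedsT pairs A (m - k), prev.getD b 0 = pvDp pairs k b := by
      intro b hb
      exact hprop k (le_refl _) b hb
    have hdp : pvDp pairs (k+1) a
        = (if a = 0 then 0
           else if w ≤ a then max (v + pvDp pairs k (a - w)) (pvDp pairs k a)
           else pvDp pairs k a) := by
      simp only [pvDp, ← hwdef, ← hvdef]
    rw [hdp]
    by_cases h0 : a = 0
    · rw [if_pos h0, if_pos h0]
    rw [if_neg h0, if_neg h0]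
    by_cases hg : w ≤ a
    · rw [if_pos hg, if_pos hg, hprevs a (hmono a ha)]
      have hshift : a - w ∈ pvNeedsT pairs A (m - k) := by
        have ht : m - k = (m - (k+1)) + 1 := by omega
        rw [ht]
        have hcast : ((m - 1 - (m - (k+1)) : Nat) : Int) = ((k:Nat):Int) := by omega
        have := pv_needs_shift pairs A (m - (k+1)) a ha h0 (by rw [← hm, hcast, ← hwdef]; exact hg)
        rw [← hm, hcast, ← hwdef] at this
        exact this
      rw [hprevs _ hshift]
    · rw [if_neg hg, if_neg hg, hprevs a (hmono a ha)]
  · have hi' : i ≤ k := by omega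
    rw [pv_pyGetD_natCast_set_ne rows i (k+1) _ _ (by omega)]
    exact hprop i hi' a ha

theorem pv_rows_char (pairs : List (Int × Int)) (A : Int) (i : Nat) (hi : i ≤ pairs.length)
    (a : Int) (ha : a ∈ pvNeedsT pairs A (pairs.length - i)) :
    (PySem.List.pyGetD (pvAltRows pairs (pvAltNeeds pairs A)) (i : Int) PySem.Dict.empty).getD a 0
      = pvDp pairs i a := by
  set m := pairs.length with hm
  have hlen0 : ((PySem.List.pyRange 0 ((m : Int) + 1) 1).map
      (fun _ => (PySem.Dict.empty : PySem.Dict Int Int))).length = m + 1 := by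
    rw [List.length_map, PySem.List.length_pyRange_one]
    omega
  have hbase : pvRprop pairs A 0
      (PySem.List.pySetD ((PySem.List.pyRange 0 ((m : Int) + 1) 1).map
          (fun _ => (PySem.Dict.empty : PySem.Dict Int Int))) 0
        ((PySem.List.pyGetD (pvAltNeeds pairs A) 0 [] : List Int).foldl
          (fun d a => d.insert a 0) PySem.Dict.empty)) := by
    constructor
    · rw [PySem.List.pySetD_of_nonneg _ _ (le_refl _), List.length_set, hlen0]
    · intro j hj a' ha'
      have hj0 : j = 0 := by omega
      subst hj0
      have hneeds0 : (PySem.List.pyGetD (pvAltNeeds pairs A) 0 [] : List Int)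
          = pvNeedsT pairs A m := by
        have := pv_needs_mem pairs A m 0 (by omega)
        simpa using this
      rw [PySem.List.pySetD_of_nonneg _ _ (le_refl _)]
      simp only [Nat.cast_zero, Int.toNat_zero]
      rw [PySem.List.pyGetD_of_nonneg _ _ (le_refl (0:Int))]
      simp only [Int.toNat_zero]
      rw [List.getD_eq_getElem?_getD, List.getElem?_set_self (by rw [hlen0]; omega)]
      simp only [Option.getD_some]
      rw [hneeds0]
      have hconst : (fun (d : PySem.Dict Int Int) (a : Int) => d.insert a 0)
          = (fun (d : PySem.Dict Int Int) (a : Int) => d.insert a ((fun _ => (0:Int)) a)) := rfl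
      rw [hconst, pv_foldl_insert_getD_of_mem _ _ _ _ (pv_needs_nodup pairs A _) (by simpa using ha')]
      rfl
  have aux : ∀ K, K ≤ m → pvRprop pairs A K
      ((List.range K).foldl (fun rows (kk : Nat) =>
          pvAltRowsStep pairs (pvAltNeeds pairs A) rows (1 + (kk:Int)))
        (PySem.List.pySetD ((PySem.List.pyRange 0 ((m : Int) + 1) 1).map
            (fun _ => (PySem.Dict.empty : PySem.Dict Int Int))) 0
          ((PySem.List.pyGetD (pvAltNeeds pairs A) 0 [] : List Int).foldl
            (fun d a => d.insert a 0) PySem.Dict.empty))) := by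
    intro K
    induction K with
    | zero => intro _; exact hbase
    | succ K ih =>
      intro hK
      rw [List.range_succ, List.foldl_append, List.foldl_cons, List.foldl_nil]
      have hcast : (1 + (K:Int)) = (((K+1:Nat)):Int) := by push_cast; ring
      rw [hcast]
      exact pv_rows_step pairs A K (by omega) _ (ih (by omega))
  have hfold : pvAltRows pairs (pvAltNeeds pairs A)
      = (List.range m).foldl (fun rows (kk : Nat) =>
          pvAltRowsStep pairs (pvAltNeeds pairs A) rows (1 + (kk:Int)))
        (PySem.List.pySetD ((PySem.List.pyRange 0 ((m : Int) + 1) 1).map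
            (fun _ => (PySem.Dict.empty : PySem.Dict Int Int))) 0
          ((PySem.List.pyGetD (pvAltNeeds pairs A) 0 [] : List Int).foldl
            (fun d a => d.insert a 0) PySem.Dict.empty)) := by
    unfold pvAltRows
    rw [← hm]
    rw [PySem.List.pyRange_one 1 ((m:Int) + 1), show (((m:Int) + 1) - 1).toNat = m by omega,
        List.foldl_map]
  rw [hfold]
  exact (aux m (le_refl _)).2 i hi a ha

-- ---- the output phase: both programs map taken pairs to matching keys in order ----

theorem pv_final_eq (stuffdict : List (String × Int × Int)) (tk : List (Int × Int)) :
    pvAFinal stuffdict tk = pvAltFinal stuffdict tk := by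
  unfold pvAFinal pvAltFinal
  have hA : ∀ (acc : List String) (search : Int × Int),
      stuffdict.foldl (fun acc kv => if kv.2 = search then acc ++ [kv.1] else acc) acc
        = acc ++ (stuffdict.filter (fun kv => kv.2 == search)).map (fun kv => kv.1) := by
    intro acc search
    rw [PySem.List.foldl_append_ite (fun kv : String × Int × Int => kv.2 = search) (fun kv => kv.1)]
    congr 2
    apply List.filter_congr
    intro kv _
    rw [Bool.eq_iff_iff]
    simp
  have hB : ∀ t : Int × Int,
      (stuffdict.foldl (fun d kv => d.modify kv.2 [] (fun l => l ++ [kv.1]))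
        (PySem.Dict.empty : PySem.Dict (Int × Int) (List String))).getD t []
      = (stuffdict.filter (fun kv => kv.2 == t)).map (fun kv => kv.1) := by
    intro t
    have hmap : stuffdict.foldl (fun d kv => d.modify kv.2 [] (fun l => l ++ [kv.1]))
          (PySem.Dict.empty : PySem.Dict (Int × Int) (List String))
        = (stuffdict.map (fun kv => (kv.2, kv.1))).foldl
            (fun d p => d.modify p.1 [] (fun l => l ++ [p.2])) PySem.Dict.empty := by
      rw [List.foldl_map]
    rw [hmap, PySem.Dict.getD_foldl_modify_append]
    rw [PySem.Dict.getD_empty, List.nil_append, List.filter_map, List.map_map]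
    rfl
  have h1 : tk.foldl (fun acc search =>
        stuffdict.foldl (fun acc kv => if kv.2 = search then acc ++ [kv.1] else acc) acc) []
      = tk.foldl (fun acc search =>
          acc ++ (stuffdict.filter (fun kv => kv.2 == search)).map (fun kv => kv.1)) [] := by
    apply PySem.List.foldl_congr_mem
    intro acc x _
    exact hA acc x
  have h2 : tk.foldl (fun acc t => acc ++
        (stuffdict.foldl (fun d kv => d.modify kv.2 [] (fun l => l ++ [kv.1]))
          (PySem.Dict.empty : PySem.Dict (Int × Int) (List String))).getD t []) []
      = tk.foldl (fun acc search =>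
          acc ++ (stuffdict.filter (fun kv => kv.2 == search)).map (fun kv => kv.1)) [] := by
    apply PySem.List.foldl_congr_mem
    intro acc x _
    rw [hB x]
  rw [h1, ← h2]

-- ---- the backtracking loops ----

def pvStepA (V : List (List Int)) (area value : List Int)
    (s : Int × Int × List (Int × Int)) (i : Int) : Int × Int × List (Int × Int) :=
  if s.1 ≤ 0 then s
  else if s.1 = pvGet2 V (i-1) s.2.1 then s
  else (s.1 - PySem.List.pyGetD value (i-1) 0, s.2.1 - PySem.List.pyGetD area (i-1) 0,
        s.2.2 ++ [(PySem.List.pyGetD area (i-1) 0, PySem.List.pyGetD value (i-1) 0)])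

theorem pv_abt_fold (mt : List (List Int) × List Int × List Int) (A : Int) :
    pvABacktrack mt A
      = ((PySem.List.pyRange (mt.2.2.length : Int) 0 (-1)).foldl (pvStepA mt.1 mt.2.1 mt.2.2)
          (pvGet2 mt.1 (mt.2.2.length : Int) A, A, [])).2.2 := rfl

theorem pv_fold_stuck (V : List (List Int)) (area value : List Int) (l : List Int)
    (s : Int × Int × List (Int × Int)) (hs : s.1 ≤ 0) :
    l.foldl (pvStepA V area value) s = s := by
  induction l with
  | nil => rfl
  | cons x t ih =>
    rw [List.foldl_cons, show pvStepA V area value s x = s by unfold pvStepA; rw [if_pos hs], ih]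

theorem pv_fold_prefix (V : List (List Int)) (area value : List Int) (l : List Int)
    (s : Int × Int × List (Int × Int)) :
    s.2.2 <+: (l.foldl (pvStepA V area value) s).2.2 := by
  induction l generalizing s with
  | nil => exact List.prefix_refl _
  | cons x t ih =>
    rw [List.foldl_cons]
    refine List.IsPrefix.trans ?_ (ih (pvStepA V area value s x))
    unfold pvStepA
    split_ifs
    · exact List.prefix_refl _
    · exact List.prefix_refl _
    · exact List.prefix_append_of_prefix (List.prefix_refl _)

theorem pv_pairs_get_in (pairs : List (Int × Int)) (j : Nat) (hj : j < pairs.length) :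
    PySem.List.pyGetD pairs (j : Int) (0,0) ∈ pairs := by
  rw [PySem.List.pyGetD_natCast, List.getD_eq_getElem?_getD, List.getElem?_eq_getElem hj]
  exact List.getElem_mem _

theorem pv_fold_elems (s : List (String × Int × Int)) (V : List (List Int)) (l : List Int)
    (st : Int × Int × List (Int × Int))
    (hl : ∀ j ∈ l, 1 ≤ j ∧ j ≤ ((s.map (fun p => p.2)).length : Int))
    (hst : ∀ x ∈ st.2.2, x ∈ s.map (fun p => p.2)) :
    ∀ x ∈ (l.foldl (pvStepA V (s.map (fun p => p.2.1)) (s.map (fun p => p.2.2))) st).2.2,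
      x ∈ s.map (fun p => p.2) := by
  induction l generalizing st with
  | nil => exact hst
  | cons j t ih =>
    rw [List.foldl_cons]
    refine ih _ (fun x hx => hl x (List.mem_cons_of_mem _ hx)) (fun x hx => ?_)
    have hj := hl j (List.mem_cons_self)
    revert hx
    unfold pvStepA
    split_ifs with h1 h2
    · exact fun hx => hst _ hx
    · exact fun hx => hst _ hx
    · intro hx
      rcases List.mem_append.mp hx with h | h
      · exact hst _ h
      · have hxe : x = (PySem.List.pyGetD (s.map (fun p => p.2.1)) (j-1) 0,
            PySem.List.pyGetD (s.map (fun p => p.2.2)) (j-1) 0) := List.mem_singleton.mp h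
        rw [hxe, pv_area_get, pv_value_get]
        have hcast : (j - 1 : Int) = (((j-1).toNat : Nat) : Int) := by omega
        rw [hcast]
        exact pv_pairs_get_in _ _ (by simp at hj ⊢; omega)

theorem pv_vget (pairs : List (Int × Int)) (i : Nat) (hi : i ≤ pairs.length) (a : Int)
    (h0 : 0 ≤ a) (h1 : a ≤ 2000) :
    pvGet2 (pvVmap pairs) (i : Int) a = pvDp pairs i a := by
  unfold pvGet2 pvVmap
  rw [PySem.List.pyGetD_map_pyRange_of_nonneg _ _ _ _ (by positivity) (by push_cast; omega)]
  rw [Int.toNat_natCast, pv_row_eq_R, pv_row_get _ _ _ h0 h1]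

theorem pv_vget_neg (pairs : List (Int × Int)) (i : Nat) (hi : i ≤ pairs.length) (a : Int)
    (h0 : -2001 ≤ a) (h1 : a < 0) :
    pvGet2 (pvVmap pairs) (i : Int) a = pvDp pairs i (2001 + a) := by
  unfold pvGet2 pvVmap
  rw [PySem.List.pyGetD_map_pyRange_of_nonneg _ _ _ _ (by positivity) (by push_cast; omega)]
  rw [Int.toNat_natCast, pv_row_eq_R, pv_row_get_neg _ _ _ h0 h1]

theorem pv_altloop_stuck (pairs : List (Int × Int)) (rows : List (PySem.Dict Int Int))
    (i : Nat) (res a : Int) (tk : List (Int × Int)) (h : res ≤ 0) :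
    pvAltLoop pairs rows i res a tk = tk := by
  cases i with
  | zero => rfl
  | succ i => unfold pvAltLoop; rw [if_pos h]

theorem pv_bt_eq (s : List (String × Int × Int)) (A : Int)
    (hw : ∀ p ∈ s.map (fun p => p.2), 0 ≤ p.1) :
    ∀ i, i ≤ s.length → ∀ res a tk, res = pvDp (s.map (fun p => p.2)) i a →
    0 ≤ a → a ≤ 2000 → a ∈ pvNeedsT (s.map (fun p => p.2)) A ((s.map (fun p => p.2)).length - i) →
    ((PySem.List.pyRange (i : Int) 0 (-1)).foldl
        (pvStepA (pvVmap (s.map (fun p => p.2))) (s.map (fun p => p.2.1)) (s.map (fun p => p.2.2)))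
        (res, a, tk)).2.2
      = pvAltLoop (s.map (fun p => p.2))
          (pvAltRows (s.map (fun p => p.2)) (pvAltNeeds (s.map (fun p => p.2)) A)) i res a tk := by
  set pairs := s.map (fun p => p.2) with hpairs
  have hm : pairs.length = s.length := by simp [hpairs]
  intro i
  induction i with
  | zero =>
    intro _ res a tk _ _ _ _
    rw [PySem.List.pyRange_neg_one_eq_nil (by norm_num)]
    rfl
  | succ i ih =>
    intro hi res a tk hres h0 h1 hmem
    rw [show (((i+1:Nat)):Int) = (i:Int)+1 by push_cast; ring,
        PySem.List.pyRange_neg_one_cons (by positivity), List.foldl_cons,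
        show ((i:Int)+1-1 : Int) = ((i:Nat):Int) by ring]
    have hrowsrd : (PySem.List.pyGetD
          (pvAltRows pairs (pvAltNeeds pairs A)) ((i:Nat):Int) PySem.Dict.empty).getD a 0
        = pvDp pairs i a := by
      apply pv_rows_char pairs A i (by omega) a
      have : pairs.length - i = (pairs.length - (i+1)) + 1 := by omega
      rw [this]
      exact pv_needs_mono pairs A _ a hmem
    have hvrd : pvGet2 (pvVmap pairs) ((i:Int)+1-1) a = pvDp pairs i a := by
      rw [show ((i:Int)+1-1 : Int) = ((i:Nat):Int) by ring]
      exact pv_vget pairs i (by omega) a h0 h1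
    set w := (PySem.List.pyGetD pairs ((i:Nat):Int) (0,0)).1 with hwdef
    set v := (PySem.List.pyGetD pairs ((i:Nat):Int) (0,0)).2 with hvdef
    have harea : PySem.List.pyGetD (s.map (fun p => p.2.1)) ((i:Int)+1-1) 0 = w := by
      rw [show ((i:Int)+1-1 : Int) = ((i:Nat):Int) by ring, pv_area_get]
    have hvalue : PySem.List.pyGetD (s.map (fun p => p.2.2)) ((i:Int)+1-1) 0 = v := by
      rw [show ((i:Int)+1-1 : Int) = ((i:Nat):Int) by ring, pv_value_get]
    have hstep : pvStepA (pvVmap pairs) (s.map (fun p => p.2.1)) (s.map (fun p => p.2.2))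
        (res, a, tk) ((i:Int)+1)
        = if res ≤ 0 then (res, a, tk)
          else if res = pvDp pairs i a then (res, a, tk)
          else (res - v, a - w, tk ++ [(w, v)]) := by
      unfold pvStepA
      dsimp only
      rw [hvrd, harea, hvalue]
    rw [hstep]
    by_cases hstop : res ≤ 0
    · rw [if_pos hstop, pv_fold_stuck _ _ _ _ (res, a, tk) hstop,
          pv_altloop_stuck _ _ _ _ _ _ hstop]
    · rw [if_neg hstop]
      unfold pvAltLoop
      rw [if_neg hstop, hrowsrd]
      by_cases hskip : res = pvDp pairs i a
      · rw [if_pos hskip, if_pos hskip]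
        exact ih (by omega) res a tk hskip h0 h1
          (by have : pairs.length - i = (pairs.length - (i+1)) + 1 := by omega
              rw [this]; exact pv_needs_mono pairs A _ a hmem)
      · rw [if_neg hskip, if_neg hskip]
        have hne : pvDp pairs (i+1) a ≠ pvDp pairs i a := by rw [← hres]; exact hskip
        obtain ⟨ha0, hwle, heq⟩ := pv_dp_succ_ne pairs i a hne
        have hwlew : w ≤ a := hwle
        have hwnn : 0 ≤ w := by
          rw [hwdef]; exact pv_pairs_fst_nonneg pairs hw _ (by positivity)
        have hres' : res - v = pvDp pairs i (a - w) := by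
          rw [hres, heq, hvdef, hwdef]; ring
        refine ih (by omega) (res - v) (a - w) (tk ++ [(w, v)]) hres' (by omega) (by omega) ?_
        have ht : pairs.length - i = (pairs.length - (i+1)) + 1 := by omega
        rw [ht]
        have hcast : ((pairs.length - 1 - (pairs.length - (i+1)) : Nat) : Int) = ((i:Nat):Int) := by
          omega
        have hs := pv_needs_shift pairs A (pairs.length - (i+1)) a hmem ha0
          (by rw [hcast]; exact hwle)
        rw [hcast] at hs
        exact hs

-- ---- positivity of the optimum vs existence of a fitting item ----

theorem pv_dp_pos_item (pairs : List (Int × Int)) (hw : ∀ p ∈ pairs, 0 ≤ p.1) :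
    ∀ (i : Nat) (a : Int), 0 < pvDp pairs i a →
      ∃ j : Nat, j < pairs.length ∧ 0 < (PySem.List.pyGetD pairs (j:Int) (0,0)).2 ∧
        (PySem.List.pyGetD pairs (j:Int) (0,0)).1 ≤ a := by
  intro i
  induction i with
  | zero => intro a h; exact absurd h (by simp [pvDp])
  | succ i ih =>
    intro a h
    by_cases h0 : a = 0
    · rw [show pvDp pairs (i+1) a = 0 by simp only [pvDp]; rw [if_pos h0]] at h
      exact absurd h (by omega)
    have hd : pvDp pairs (i+1) a
        = if (PySem.List.pyGetD pairs (i : Int) (0,0)).1 ≤ a then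
            max ((PySem.List.pyGetD pairs (i : Int) (0,0)).2 +
              pvDp pairs i (a - (PySem.List.pyGetD pairs (i : Int) (0,0)).1)) (pvDp pairs i a)
          else pvDp pairs i a := by
      simp only [pvDp]; rw [if_neg h0]
    rw [hd] at h
    by_cases hg : (PySem.List.pyGetD pairs (i : Int) (0,0)).1 ≤ a
    · rw [if_pos hg] at h
      rcases lt_max_iff.mp h with hp | hp
      · by_cases hv : 0 < (PySem.List.pyGetD pairs (i : Int) (0,0)).2
        · refine ⟨i, ?_, hv, hg⟩
          by_contra hge
          rw [pv_pairs_get_oob pairs (i:Int) (by omega)] at hv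
          exact absurd hv (by norm_num)
        · have : 0 < pvDp pairs i (a - (PySem.List.pyGetD pairs (i : Int) (0,0)).1) := by omega
          obtain ⟨j, hj1, hj2, hj3⟩ := ih _ this
          have hwnn : 0 ≤ (PySem.List.pyGetD pairs (i : Int) (0,0)).1 :=
            pv_pairs_fst_nonneg pairs hw _ (by positivity)
          exact ⟨j, hj1, hj2, by omega⟩
      · exact ih _ hp
    · rw [if_neg hg] at h
      exact ih _ h

theorem pv_dp_pos_of_item (pairs : List (Int × Int)) (j : Nat) (hj : j < pairs.length)
    (hv : 0 < (PySem.List.pyGetD pairs (j:Int) (0,0)).2)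
    (c : Int) (hc : c ≠ 0)
    (hwle : (PySem.List.pyGetD pairs (j:Int) (0,0)).1 ≤ c) :
    0 < pvDp pairs pairs.length c := by
  have hstep : 0 < pvDp pairs (j+1) c := by
    have hd : pvDp pairs (j+1) c
        = max ((PySem.List.pyGetD pairs (j : Int) (0,0)).2 +
            pvDp pairs j (c - (PySem.List.pyGetD pairs (j : Int) (0,0)).1)) (pvDp pairs j c) := by
      simp only [pvDp]; rw [if_neg hc, if_pos hwle]
    rw [hd]
    have := pv_dp_nonneg pairs j (c - (PySem.List.pyGetD pairs (j : Int) (0,0)).1)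
    have hle := le_max_left ((PySem.List.pyGetD pairs (j : Int) (0,0)).2 +
        pvDp pairs j (c - (PySem.List.pyGetD pairs (j : Int) (0,0)).1)) (pvDp pairs j c)
    omega
  exact lt_of_lt_of_le hstep (pv_dp_mono pairs (j+1) pairs.length (by omega) c)

-- existence of a fitting positive item, in input terms vs index terms
theorem pv_item_iff (s : List (String × Int × Int)) (c : Int) :
    (∃ p ∈ s, 0 < p.2.2 ∧ p.2.1 ≤ c) ↔
    (∃ j : Nat, j < (s.map (fun p => p.2)).length ∧
      0 < (PySem.List.pyGetD (s.map (fun p => p.2)) (j:Int) (0,0)).2 ∧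
      (PySem.List.pyGetD (s.map (fun p => p.2)) (j:Int) (0,0)).1 ≤ c) := by
  constructor
  · rintro ⟨p, hp, h1, h2⟩
    obtain ⟨j, hj, hpe⟩ := List.mem_iff_getElem.mp hp
    refine ⟨j, by simp; omega, ?_, ?_⟩
    · rw [PySem.List.pyGetD_natCast, List.getD_eq_getElem?_getD,
          List.getElem?_eq_getElem (by simp; omega)]
      simp only [Option.getD_some, List.getElem_map]
      rw [hpe]; exact h1
    · rw [PySem.List.pyGetD_natCast, List.getD_eq_getElem?_getD,
          List.getElem?_eq_getElem (by simp; omega)]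
      simp only [Option.getD_some, List.getElem_map]
      rw [hpe]; exact h2
  · rintro ⟨j, hj, h1, h2⟩
    rw [PySem.List.pyGetD_natCast, List.getD_eq_getElem?_getD,
        List.getElem?_eq_getElem hj] at h1 h2
    simp only [Option.getD_some, List.getElem_map] at h1 h2
    exact ⟨s[j]'(by simp at hj; omega), List.getElem_mem _, h1, h2⟩

-- ---- the A-side output as a flatMap, reused by the proofs ----

theorem pv_afinal_flat (stuffdict : List (String × Int × Int)) (tk : List (Int × Int)) :
    pvAFinal stuffdict tk
      = tk.flatMap (fun t => (stuffdict.filter (fun kv => kv.2 == t)).map (fun kv => kv.1)) := by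
  unfold pvAFinal
  have h1 : tk.foldl (fun acc search =>
        stuffdict.foldl (fun acc kv => if kv.2 = search then acc ++ [kv.1] else acc) acc) []
      = tk.foldl (fun acc search =>
          acc ++ (stuffdict.filter (fun kv => kv.2 == search)).map (fun kv => kv.1)) [] := by
    apply PySem.List.foldl_congr_mem
    intro acc x _
    rw [PySem.List.foldl_append_ite (fun kv : String × Int × Int => kv.2 = x) (fun kv => kv.1)]
    congr 2
    apply List.filter_congr
    intro kv _
    rw [Bool.eq_iff_iff]
    simp
  rw [h1, PySem.List.foldl_append_eq_flatMap, List.nil_append]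

-- ---- the negative-capacity backtrack of A takes at least one item when the optimum is positive ----

theorem pv_btneg_ne (s : List (String × Int × Int)) (A : Int)
    (hw : ∀ p ∈ s.map (fun p => p.2), 0 ≤ p.1) :
    ∀ i, i ≤ s.length → ∀ a tk, a < 0 → -2001 ≤ a →
    ∀ res, res = pvDp (s.map (fun p => p.2)) i (2001 + a) → 0 < res →
    ((PySem.List.pyRange (i : Int) 0 (-1)).foldl
        (pvStepA (pvVmap (s.map (fun p => p.2))) (s.map (fun p => p.2.1)) (s.map (fun p => p.2.2)))
        (res, a, tk)).2.2 ≠ tk := by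
  set pairs := s.map (fun p => p.2) with hpairs
  have hm : pairs.length = s.length := by simp [hpairs]
  intro i
  induction i with
  | zero =>
    intro _ a tk _ _ res hres hpos
    rw [hres, show pvDp pairs 0 (2001 + a) = 0 from rfl] at hpos
    exact absurd hpos (by omega)
  | succ i ih =>
    intro hi a tk ha1 ha2 res hres hpos
    rw [show (((i+1:Nat)):Int) = (i:Int)+1 by push_cast; ring,
        PySem.List.pyRange_neg_one_cons (by positivity), List.foldl_cons]
    have hvrd : pvGet2 (pvVmap pairs) ((i:Int)+1-1) a = pvDp pairs i (2001 + a) := by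
      rw [show ((i:Int)+1-1 : Int) = ((i:Nat):Int) by ring]
      exact pv_vget_neg pairs i (by omega) a ha2 ha1
    set w := PySem.List.pyGetD (s.map (fun p => p.2.1)) ((i:Int)+1-1) 0 with hwdef
    set v := PySem.List.pyGetD (s.map (fun p => p.2.2)) ((i:Int)+1-1) 0 with hvdef
    have hstep : pvStepA (pvVmap pairs) (s.map (fun p => p.2.1)) (s.map (fun p => p.2.2))
        (res, a, tk) ((i:Int)+1)
        = if res ≤ 0 then (res, a, tk)
          else if res = pvDp pairs i (2001 + a) then (res, a, tk)
          else (res - v, a - w, tk ++ [(w, v)]) := by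
      unfold pvStepA
      dsimp only
      rw [hvrd, ← hwdef, ← hvdef]
    rw [hstep, if_neg (by omega),
        show ((i:Int)+1-1 : Int) = ((i:Nat):Int) by ring]
    by_cases hskip : res = pvDp pairs i (2001 + a)
    · rw [if_pos hskip]
      exact ih (by omega) a tk ha1 ha2 res (by rw [hskip]) hpos
    · rw [if_neg hskip]
      intro hfin
      have hpref := pv_fold_prefix (pvVmap pairs) (s.map (fun p => p.2.1)) (s.map (fun p => p.2.2))
        (PySem.List.pyRange ((i:Nat):Int) 0 (-1)) (res - v, a - w, tk ++ [(w, v)])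
      rw [hfin] at hpref
      have hlen := List.IsPrefix.length_le hpref
      rw [List.length_append, List.length_singleton] at hlen
      omega

-- ---- the three verdicts ----

theorem pv_taken_eq (s : List (String × Int × Int)) (A : Int)
    (hpre : Pre_get_selected_items_list s A) (hA0 : 0 ≤ A) :
    pvABacktrack (get_memtable s) A = pvAltTaken s A := by
  obtain ⟨h1, h2, hw0⟩ := hpre
  have hw : ∀ p ∈ s.map (fun p => p.2), 0 ≤ p.1 := by
    intro p hp
    obtain ⟨q, hq, hqe⟩ := List.mem_map.mp hp
    rw [← hqe]; exact hw0 q hq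
  set pairs := s.map (fun p => p.2) with hpairs
  have hm : pairs.length = s.length := by simp [hpairs]
  have hmt1 : (get_memtable s).1 = pvVmap pairs := pv_table_char s hw
  have hmt21 : (get_memtable s).2.1 = s.map (fun p => p.2.1) := rfl
  have hmt22 : (get_memtable s).2.2 = s.map (fun p => p.2.2) := rfl
  have hlen : (((s.map (fun p => p.2.2)).length : Nat) : Int) = ((s.length : Nat) : Int) := by simp
  rw [pv_abt_fold, hmt1, hmt21, hmt22, hlen]
  have hres0 : pvGet2 (pvVmap pairs) ((s.length : Nat) : Int) A = pvDp pairs s.length A := by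
    exact pv_vget pairs s.length (by omega) A hA0 h2
  rw [hres0]
  have hmemA : A ∈ pvNeedsT pairs A (pairs.length - s.length) := by
    rw [hm, Nat.sub_self]
    exact pv_needs_self pairs A
  have hbt := pv_bt_eq s A hw s.length (le_refl _) (pvDp pairs s.length A) A [] rfl hA0 h2 hmemA
  rw [hbt]
  have hread : (PySem.List.pyGetD (pvAltRows pairs (pvAltNeeds pairs A))
        ((pairs.length : Nat) : Int) PySem.Dict.empty).getD A 0 = pvDp pairs pairs.length A :=
    pv_rows_char pairs A pairs.length (le_refl _) A
      (by rw [Nat.sub_self]; exact pv_needs_self pairs A)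
  unfold pvAltTaken
  rw [← hpairs, hread, hm]

theorem pv_taken_neg_nil (s : List (String × Int × Int)) (A : Int)
    (hpre : Pre_get_selected_items_list s A) (hAneg : A < 0)
    (hdp0 : pvDp (s.map (fun p => p.2)) s.length (2001 + A) = 0) :
    pvABacktrack (get_memtable s) A = [] := by
  obtain ⟨h1, h2, hw0⟩ := hpre
  have hw : ∀ p ∈ s.map (fun p => p.2), 0 ≤ p.1 := by
    intro p hp
    obtain ⟨q, hq, hqe⟩ := List.mem_map.mp hp
    rw [← hqe]; exact hw0 q hq
  set pairs := s.map (fun p => p.2) with hpairs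
  have hmt1 : (get_memtable s).1 = pvVmap pairs := pv_table_char s hw
  have hmt21 : (get_memtable s).2.1 = s.map (fun p => p.2.1) := rfl
  have hmt22 : (get_memtable s).2.2 = s.map (fun p => p.2.2) := rfl
  have hlen : (((s.map (fun p => p.2.2)).length : Nat) : Int) = ((s.length : Nat) : Int) := by simp
  rw [pv_abt_fold, hmt1, hmt21, hmt22, hlen]
  have hres0 : pvGet2 (pvVmap pairs) ((s.length : Nat) : Int) A = pvDp pairs s.length (2001 + A) :=
    pv_vget_neg pairs s.length (by simp [hpairs]) A h1 hAneg
  rw [hres0, hdp0, pv_fold_stuck _ _ _ _ ((0:Int), A, ([] : List (Int × Int))) (le_refl 0)]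

theorem pv_alt_taken_neg_nil (s : List (String × Int × Int)) (A : Int)
    (hw0 : ∀ p ∈ s, 0 ≤ p.2.1) (hAneg : A < 0) :
    pvAltTaken s A = [] := by
  have hw : ∀ p ∈ s.map (fun p => p.2), 0 ≤ p.1 := by
    intro p hp
    obtain ⟨q, hq, hqe⟩ := List.mem_map.mp hp
    rw [← hqe]; exact hw0 q hq
  set pairs := s.map (fun p => p.2) with hpairs
  unfold pvAltTaken
  rw [← hpairs]
  have hmemA : A ∈ pvNeedsT pairs A (pairs.length - pairs.length) := by
    rw [Nat.sub_self]; exact pv_needs_self pairs A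
  rw [pv_rows_char pairs A pairs.length (le_refl _) A hmemA,
      pv_dp_neg pairs hw pairs.length A hAneg]
  exact pv_altloop_stuck _ _ _ _ _ _ (le_refl 0)

theorem get_selected_items_list_spec : Claim_unchanged_get_selected_items_list := by
  intro s A hdom hpre
  unfold Spec_get_selected_items_list
  intro hnd
  show pvAFinal s (pvABacktrack (get_memtable s) A) = pvAltFinal s (pvAltTaken s A)
  by_cases hA0 : 0 ≤ A
  · rw [pv_taken_eq s A hpre hA0, pv_final_eq]
  · have hAneg : A < 0 := by omega
    obtain ⟨h1, h2, hw0⟩ := hpre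
    have hw : ∀ p ∈ s.map (fun p => p.2), 0 ≤ p.1 := by
      intro p hp
      obtain ⟨q, hq, hqe⟩ := List.mem_map.mp hp
      rw [← hqe]; exact hw0 q hq
    have hdp0 : pvDp (s.map (fun p => p.2)) s.length (2001 + A) = 0 := by
      by_cases hA2001 : A = -2001
      · rw [hA2001, show ((2001:Int) + -2001) = 0 by ring, pv_dp_zero]
      · by_contra hne
        have hnn := pv_dp_nonneg (s.map (fun p => p.2)) s.length (2001 + A)
        have hpos : 0 < pvDp (s.map (fun p => p.2)) s.length (2001 + A) := by omega
        have hlen2 : s.length = (s.map (fun p => p.2)).length := by simp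
        rw [hlen2] at hpos
        obtain ⟨j, hj1, hj2, hj3⟩ := pv_dp_pos_item (s.map (fun p => p.2)) hw _ _ hpos
        have hitem : ∃ p ∈ s, 0 < p.2.2 ∧ p.2.1 ≤ A + 2001 := by
          rw [pv_item_iff s (A + 2001)]
          exact ⟨j, hj1, hj2, by omega⟩
        exact hnd ⟨hAneg, by omega, hitem⟩
    rw [pv_taken_neg_nil s A ⟨h1, h2, hw0⟩ hAneg hdp0,
        pv_alt_taken_neg_nil s A hw0 hAneg]
    exact pv_final_eq s []

theorem get_selected_items_list_tight : Claim_exact_get_selected_items_list := by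
  intro s A hdom hpre hD
  obtain ⟨hAneg, hA2000, hitem⟩ := hD
  obtain ⟨h1, h2, hw0⟩ := hpre
  have hw : ∀ p ∈ s.map (fun p => p.2), 0 ≤ p.1 := by
    intro p hp
    obtain ⟨q, hq, hqe⟩ := List.mem_map.mp hp
    rw [← hqe]; exact hw0 q hq
  set pairs := s.map (fun p => p.2) with hpairs
  have hm : pairs.length = s.length := by simp [hpairs]
  -- B returns []
  have hB : get_selected_items_list_alt s A = [] := by
    show pvAltFinal s (pvAltTaken s A) = []
    rw [pv_alt_taken_neg_nil s A hw0 hAneg]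
    rfl
  rw [hB]
  -- A returns a nonempty list
  have hmt1 : (get_memtable s).1 = pvVmap pairs := pv_table_char s hw
  have hmt21 : (get_memtable s).2.1 = s.map (fun p => p.2.1) := rfl
  have hmt22 : (get_memtable s).2.2 = s.map (fun p => p.2.2) := rfl
  have hlen : (((s.map (fun p => p.2.2)).length : Nat) : Int) = ((s.length : Nat) : Int) := by simp
  have hpos : 0 < pvDp pairs s.length (2001 + A) := by
    obtain ⟨j, hj1, hj2, hj3⟩ := (pv_item_iff s (A + 2001)).mp hitem
    rw [← hpairs] at hj1 hj2 hj3
    have := pv_dp_pos_of_item pairs j hj1 hj2 (2001 + A) (by omega) (by omega)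
    rwa [hm] at this
  have htkne : pvABacktrack (get_memtable s) A ≠ [] := by
    rw [pv_abt_fold, hmt1, hmt21, hmt22, hlen]
    have hres0 : pvGet2 (pvVmap pairs) ((s.length : Nat) : Int) A
        = pvDp pairs s.length (2001 + A) :=
      pv_vget_neg pairs s.length (by omega) A h1 hAneg
    rw [hres0]
    exact pv_btneg_ne s A hw s.length (le_refl _) A [] hAneg h1 _ rfl hpos
  have helems : ∀ x ∈ pvABacktrack (get_memtable s) A, x ∈ pairs := by
    rw [pv_abt_fold, hmt1, hmt21, hmt22, hlen]
    apply pv_fold_elems s (pvVmap pairs)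
    · intro j hj
      rw [PySem.List.mem_pyRange_neg_one] at hj
      constructor
      · omega
      · rw [hm]; omega
    · intro x hx
      exact absurd hx (List.not_mem_nil)
  show pvAFinal s (pvABacktrack (get_memtable s) A) ≠ []
  rw [pv_afinal_flat]
  cases htk : pvABacktrack (get_memtable s) A with
  | nil => exact absurd htk htkne
  | cons hd tl =>
    have hhd : hd ∈ pairs := helems hd (by rw [htk]; exact List.mem_cons_self)
    obtain ⟨kv, hkv, hkve⟩ := List.mem_map.mp hhd
    rw [List.flatMap_cons]
    intro hcontra
    have : (s.filter (fun kv => kv.2 == hd)).map (fun kv => kv.1) = [] :=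
      List.append_eq_nil_iff.mp hcontra |>.1
    have hfil : kv ∈ s.filter (fun kv => kv.2 == hd) := by
      rw [List.mem_filter]
      exact ⟨hkv, by simp [hkve]⟩
    rw [List.map_eq_nil_iff] at this
    rw [this] at hfil
    exact absurd hfil (List.not_mem_nil)

theorem get_selected_items_list_changed : Claim_changed_get_selected_items_list := by
  unfold Claim_changed_get_selected_items_list
  refine ⟨by decide, by decide, by decide, ?_, by decide, by decide⟩
  show get_selected_items_list [("x", (1, 5))] (-2000) = ["x"]
  have hw : ∀ p ∈ ([("x", (1, 5))] : List (String × Int × Int)).map (fun p => p.2), 0 ≤ p.1 := by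
    decide
  have hmt1 := pv_table_char [("x", (1, 5))] hw
  show pvAFinal [("x", (1, 5))] (pvABacktrack (get_memtable [("x", (1, 5))]) (-2000)) = ["x"]
  have htk : pvABacktrack (get_memtable [("x", (1, 5))]) (-2000) = [(1, 5)] := by
    rw [pv_abt_fold, hmt1,
        show (get_memtable [("x", (1, 5))]).2.1
          = ([("x", (1, 5))] : List (String × Int × Int)).map (fun p => p.2.1) from rfl,
        show (get_memtable [("x", (1, 5))]).2.2
          = ([("x", (1, 5))] : List (String × Int × Int)).map (fun p => p.2.2) from rfl]
    rw [show ((([("x", (1, 5))] : List (String × Int × Int)).map (fun p => p.2.2)).length : Int)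
          = ((1:Nat):Int) from rfl]
    have hres0 : pvGet2 (pvVmap (([("x", (1, 5))] : List (String × Int × Int)).map (fun p => p.2)))
        ((1:Nat):Int) (-2000)
        = pvDp (([("x", (1, 5))] : List (String × Int × Int)).map (fun p => p.2)) 1 (2001 + (-2000)) :=
      pv_vget_neg _ 1 (by decide) _ (by norm_num) (by norm_num)
    rw [hres0, show ((2001:Int) + (-2000)) = 1 by ring,
        show pvDp (([("x", (1, 5))] : List (String × Int × Int)).map (fun p => p.2)) 1 1 = 5 from by
          decide]
    rw [show PySem.List.pyRange ((1:Nat):Int) 0 (-1) = [((1:Nat):Int)] from by decide]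
    rw [List.foldl_cons, List.foldl_nil]
    have hg : pvGet2 (pvVmap (([("x", (1, 5))] : List (String × Int × Int)).map (fun p => p.2)))
        (((1:Nat):Int) - 1) (-2000) = 0 := by
      rw [show (((1:Nat):Int) - 1 : Int) = ((0:Nat):Int) by norm_num]
      rw [pv_vget_neg _ 0 (by decide) _ (by norm_num) (by norm_num)]
      rfl
    have hstep : pvStepA
        (pvVmap (([("x", (1, 5))] : List (String × Int × Int)).map (fun p => p.2)))
        (([("x", (1, 5))] : List (String × Int × Int)).map (fun p => p.2.1))
        (([("x", (1, 5))] : List (String × Int × Int)).map (fun p => p.2.2))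
        (5, -2000, []) ((1:Nat):Int) = (0, -2001, [(1, 5)]) := by
      unfold pvStepA
      dsimp only
      rw [hg]
      decide
    rw [hstep]
  rw [htk]
  decide
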